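-- pv_equiv track=rewrite | github.com/Helmholtz-UFZ/galaxy-tools | tools/ogsAutowrap/gen.py | parse_diff_data
-- ===== SOURCE A (Python) =====
-- from typing import Any, Dict, List, Optional, Tuple
--
-- def parse_diff_data(diff_str: str, base_url: str, workdir: str, input_files: List[str]) -> List[Dict[str, str]]:
--     diff_files = []
--     seen_generated = set()
--     valid_exts = ('.vtu', '.gml', '.bin', '.asc', '.pvtu', '.msh', '.smesh', '.xdmf', '.prj', '.xml', '.png', '.geo')
--
--     clean_lines = [line.split('#')[0].strip() for line in diff_str.strip().split('\n')]
--     tokens = (" ".join(clean_lines)).split()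
--
--     i = 0
--     while i < len(tokens):
--         t1 = tokens[i]
--         if any(t1.lower().endswith(ext) for ext in valid_exts):
--             if i + 1 < len(tokens) and any(tokens[i+1].lower().endswith(ext) for ext in valid_exts):
--                 t2 = tokens[i+1]
--
--                 if t2 not in input_files and t2 not in seen_generated:
--                     ref_url = f"{base_url}/{workdir}/{t1}".replace('<PATH>', workdir) if workdir else f"{base_url}/{t1}"
--                     diff_files.append({
--                         "reference": ref_url,
--                         "generated": t2,
--                         "ftype": t2.split('.')[-1]
--                     })
--                     seen_generated.add(t2)
--                 i += 2
--                 continue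
--         i += 1
--     return diff_files
-- ===== SOURCE B (Python) =====
-- def parse_diff_data(diff_str, base_url, workdir, input_files):
--     valid_exts = ('.vtu', '.gml', '.bin', '.asc', '.pvtu', '.msh', '.smesh', '.xdmf', '.prj', '.xml', '.png', '.geo')
--
--     def is_valid(t):
--         return any(t.lower().endswith(ext) for ext in valid_exts)
--
--     clean_lines = [line.split('#')[0].strip() for line in diff_str.strip().split('\n')]
--     tokens = (" ".join(clean_lines)).split()
--
--     diff_files = []
--     seen_generated = set()
--     pending = None  # last seen valid token not yet paired
--     for t in tokens:
--         if not is_valid(t):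
--             pending = None
--         elif pending is None:
--             pending = t
--         else:
--             t1, t2 = pending, t
--             pending = None
--             if t2 not in input_files and t2 not in seen_generated:
--                 ref_url = f"{base_url}/{workdir}/{t1}".replace('<PATH>', workdir) if workdir else f"{base_url}/{t1}"
--                 diff_files.append({
--                     "reference": ref_url,
--                     "generated": t2,
--                     "ftype": t2.split('.')[-1]
--                 })
--                 seen_generated.add(t2)
--     return diff_files
-- ===== Notes on version B (the rewrite author's own statement) =====
-- stated objective: simpler
-- what changed: Replaced A's index-driven while-loop with i+=1/i+=2 stepping and lookahead tokens[i+1] by a single for-loop over the tokens carrying one `pending` state variable (last valid token not yet paired), with the same tokenization and pair/dedup logic.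
import Mathlib
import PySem

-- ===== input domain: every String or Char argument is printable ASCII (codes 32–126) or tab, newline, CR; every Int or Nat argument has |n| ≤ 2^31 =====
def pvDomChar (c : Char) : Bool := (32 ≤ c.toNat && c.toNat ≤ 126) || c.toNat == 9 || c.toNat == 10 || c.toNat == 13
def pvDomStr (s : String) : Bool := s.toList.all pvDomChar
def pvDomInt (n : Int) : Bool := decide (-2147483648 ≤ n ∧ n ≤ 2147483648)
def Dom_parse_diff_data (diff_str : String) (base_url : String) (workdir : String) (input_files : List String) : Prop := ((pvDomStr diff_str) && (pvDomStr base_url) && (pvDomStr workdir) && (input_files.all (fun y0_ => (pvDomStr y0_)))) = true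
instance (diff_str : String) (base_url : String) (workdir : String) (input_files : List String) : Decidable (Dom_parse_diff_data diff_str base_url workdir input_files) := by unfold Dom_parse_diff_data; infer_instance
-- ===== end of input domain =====

-- B replaces A's index-driven while-loop (i += 1 / i += 2) by a single left fold over the
-- tokens carrying a `pending` Option state; objective: simpler (no index arithmetic).

-- ===== shared helpers: code that is textually identical in A and in B =====
def pvValidExts : List String := [".vtu", ".gml", ".bin", ".asc", ".pvtu", ".msh", ".smesh", ".xdmf", ".prj", ".xml", ".png", ".geo"]

-- any(t.lower().endswith(ext) for ext in valid_exts)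
def pvValid (t : String) : Bool := pvValidExts.any (fun ext => PySem.Str.endswith (PySem.Str.lower t) ext)

-- clean_lines = [line.split('#')[0].strip() for line in diff_str.strip().split('\n')]; tokens = (" ".join(clean_lines)).split()
-- split? with a nonempty separator is never none (getD [] exact); split("#") is never empty ([0] via headD exact).
def pvTokens (diff_str : String) : List String :=
  let clean_lines := ((PySem.Str.split? (PySem.Str.strip diff_str) "\n").getD []).map
    (fun line => PySem.Str.strip ((((PySem.Str.split? line "#").getD []).headD "")))
  PySem.Str.split₀ (PySem.Str.join " " clean_lines)

-- f"{base_url}/{workdir}/{t1}".replace('<PATH>', workdir) if workdir else f"{base_url}/{t1}"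
def pvRefUrl (base_url workdir t1 : String) : String :=
  if workdir ≠ "" then
    PySem.Str.replace (PySem.Str.join "" [base_url, "/", workdir, "/", t1]) "<PATH>" workdir
  else PySem.Str.join "" [base_url, "/", t1]

-- the appended dict; t2.split('.') is never empty, so the [-1] indexing is exact via getLast?.getD.
def pvEntry (base_url workdir t1 t2 : String) : List (String × String) :=
  [("reference", pvRefUrl base_url workdir t1), ("generated", t2),
   ("ftype", ((((PySem.Str.split? t2 ".").getD []).getLast?)).getD "")]

-- ===== PORT A =====
-- the index-driven while loop of A, literal: i += 2 + continue on a pair, else i += 1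
def pvALoop (tokens : List String) (base_url workdir : String) (input_files : List String)
    (i : Nat) (seen : PySem.Set String) (acc : List (List (String × String))) :
    List (List (String × String)) :=
  if h : i < tokens.length then
    let t1 := tokens[i]
    if pvValid t1 then
      if h2 : i + 1 < tokens.length then
        if pvValid tokens[i+1] then
          let t2 := tokens[i+1]
          if !(input_files.contains t2) && !(PySem.Set.contains seen t2) then
            pvALoop tokens base_url workdir input_files (i + 2) (PySem.Set.add seen t2)
              (acc ++ [pvEntry base_url workdir t1 t2])
          else pvALoop tokens base_url workdir input_files (i + 2) seen acc
        else pvALoop tokens base_url workdir input_files (i + 1) seen acc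
      else pvALoop tokens base_url workdir input_files (i + 1) seen acc
    else pvALoop tokens base_url workdir input_files (i + 1) seen acc
  else acc
termination_by tokens.length - i

def parse_diff_data (diff_str : String) (base_url : String) (workdir : String) (input_files : List String) : List (List (String × String)) :=
  pvALoop (pvTokens diff_str) base_url workdir input_files 0 PySem.Set.empty []

-- ===== PORT B =====
-- one fold step of B: state = (pending, seen_generated, diff_files)
def pvBStep (base_url workdir : String) (input_files : List String)
    (st : Option String × PySem.Set String × List (List (String × String))) (t : String) :
    Option String × PySem.Set String × List (List (String × String)) :=
  if !(pvValid t) then (none, st.2.1, st.2.2)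
  else match st.1 with
    | none => (some t, st.2.1, st.2.2)
    | some t1 =>
      if !(input_files.contains t) && !(PySem.Set.contains st.2.1 t) then
        (none, PySem.Set.add st.2.1 t, st.2.2 ++ [pvEntry base_url workdir t1 t])
      else (none, st.2.1, st.2.2)

def parse_diff_data_alt (diff_str : String) (base_url : String) (workdir : String) (input_files : List String) : List (List (String × String)) :=
  ((pvTokens diff_str).foldl (pvBStep base_url workdir input_files)
    (none, PySem.Set.empty, [])).2.2

-- ===== PRECONDITION & SPEC =====
def Spec_parse_diff_data (diff_str : String) (base_url : String) (workdir : String) (input_files : List String) (out : List (List (String × String))) : Prop := out = parse_diff_data_alt diff_str base_url workdir input_files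
instance (diff_str : String) (base_url : String) (workdir : String) (input_files : List String) (out : List (List (String × String))) : Decidable (Spec_parse_diff_data diff_str base_url workdir input_files out) := by unfold Spec_parse_diff_data; infer_instance

-- ===== CLAIM (what is proved, stated in full; the proofs are below) =====
def Claim_equal_parse_diff_data : Prop := ∀ (diff_str : String) (base_url : String) (workdir : String) (input_files : List String), Dom_parse_diff_data diff_str base_url workdir input_files → Spec_parse_diff_data diff_str base_url workdir input_files (parse_diff_data diff_str base_url workdir input_files)

-- ===== LEMMAS AND PROOFS =====
-- invariant: A's loop from index i equals B's fold over the remaining tokens with no pending token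
lemma pvLoop_eq_fold (tokens : List String) (bu wd : String) (inf : List String) :
    ∀ n i seen acc, tokens.length - i ≤ n →
    pvALoop tokens bu wd inf i seen acc =
      ((tokens.drop i).foldl (pvBStep bu wd inf) (none, seen, acc)).2.2 := by
  intro n
  induction n with
  | zero =>
    intro i seen acc hn
    have hi : tokens.length ≤ i := by omega
    rw [List.drop_eq_nil_of_le hi, pvALoop]
    simp [Nat.not_lt.mpr hi]
  | succ n ih =>
    intro i seen acc hn
    by_cases h : i < tokens.length
    · rw [List.drop_eq_getElem_cons h, pvALoop, dif_pos h]
      by_cases hv : pvValid tokens[i]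
      · rw [if_pos hv]
        by_cases h2 : i + 1 < tokens.length
        · rw [dif_pos h2, List.drop_eq_getElem_cons h2]
          by_cases hv2 : pvValid tokens[i+1]
          · rw [if_pos hv2]
            simp only [List.foldl_cons]
            rw [show pvBStep bu wd inf (none, seen, acc) tokens[i] = (some tokens[i], seen, acc) from by
              simp [pvBStep, hv]]
            by_cases hc : (!(inf.contains tokens[i+1]) && !(PySem.Set.contains seen tokens[i+1])) = true
            · rw [if_pos hc,
                show pvBStep bu wd inf (some tokens[i], seen, acc) tokens[i+1]
                  = (none, PySem.Set.add seen tokens[i+1], acc ++ [pvEntry bu wd tokens[i] tokens[i+1]]) from by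
                  simp only [pvBStep, hv2, Bool.not_true, Bool.false_eq_true, if_false]
                  rw [if_pos hc]]
              exact ih (i+2) _ _ (by omega)
            · rw [if_neg hc,
                show pvBStep bu wd inf (some tokens[i], seen, acc) tokens[i+1] = (none, seen, acc) from by
                  simp only [pvBStep, hv2, Bool.not_true, Bool.false_eq_true, if_false]
                  rw [if_neg hc]]
              exact ih (i+2) _ _ (by omega)
          · have hv2' : pvValid tokens[i+1] = false := by simpa using hv2
            rw [if_neg hv2, pvALoop, dif_pos h2, if_neg hv2]
            simp only [List.foldl_cons]
            rw [show pvBStep bu wd inf (none, seen, acc) tokens[i] = (some tokens[i], seen, acc) from by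
                  simp [pvBStep, hv],
                show pvBStep bu wd inf (some tokens[i], seen, acc) tokens[i+1] = (none, seen, acc) from by
                  simp [pvBStep, hv2']]
            exact ih (i+2) _ _ (by omega)
        · rw [dif_neg h2, pvALoop, dif_neg (by omega)]
          have hd : tokens.drop (i+1) = [] := List.drop_eq_nil_of_le (by omega)
          simp [hd, pvBStep, hv]
      · have hv' : pvValid tokens[i] = false := by simpa using hv
        rw [if_neg hv]
        simp only [List.foldl_cons]
        rw [show pvBStep bu wd inf (none, seen, acc) tokens[i] = (none, seen, acc) from by
          simp [pvBStep, hv']]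
        exact ih (i+1) _ _ (by omega)
    · have hi : tokens.length ≤ i := by omega
      rw [List.drop_eq_nil_of_le hi, pvALoop]
      simp [Nat.not_lt.mpr hi]

-- ===== VERDICT (by name: the statement is the Claim_ definition above) =====
theorem parse_diff_data_spec : Claim_equal_parse_diff_data := by
  intro diff_str base_url workdir input_files _
  unfold Spec_parse_diff_data parse_diff_data parse_diff_data_alt
  simpa using pvLoop_eq_fold (pvTokens diff_str) base_url workdir input_files
    (pvTokens diff_str).length 0 PySem.Set.empty [] (by omega)
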